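-- pv_equiv track=rewrite | github.com/Ichi1234/The-Game-Rating-Predictor-A-Star-Seeker-s-Guide | controller.py | fix_toolong_text
-- ===== SOURCE A (Python) =====
-- def fix_toolong_text(data: str):
--     """If the data is too long frame will extend and my layout will broke
--     This method is use to create a new line if the data is too long"""
--     split_data = data.split(",")
--     new_str = []
--     for i in range(len(split_data)):
--         if i % 3 == 0 and i != 0 and len(data) > 38:
--             new_str.append(f"\n{split_data[i]}")
--         else:
--             new_str.append(split_data[i])
--     return ",".join(new_str)
-- ===== SOURCE B (Python) =====
-- def fix_toolong_text(data: str):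
--     if len(data) <= 38:
--         return data
--
--     def group(fields):
--         if len(fields) <= 3:
--             return ",".join(fields)
--         return ",".join(fields[:3]) + ",\n" + group(fields[3:])
--
--     return group(data.split(","))
-- ===== Notes on version B (the rewrite author's own statement) =====
-- stated objective: simpler
-- what changed: Replaces the index loop with its modulo-3 / nonzero-index test and per-element newline insertion by an early return for short strings plus a recursion over the field list that emits three comma-joined fields per line.
import Mathlib
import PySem

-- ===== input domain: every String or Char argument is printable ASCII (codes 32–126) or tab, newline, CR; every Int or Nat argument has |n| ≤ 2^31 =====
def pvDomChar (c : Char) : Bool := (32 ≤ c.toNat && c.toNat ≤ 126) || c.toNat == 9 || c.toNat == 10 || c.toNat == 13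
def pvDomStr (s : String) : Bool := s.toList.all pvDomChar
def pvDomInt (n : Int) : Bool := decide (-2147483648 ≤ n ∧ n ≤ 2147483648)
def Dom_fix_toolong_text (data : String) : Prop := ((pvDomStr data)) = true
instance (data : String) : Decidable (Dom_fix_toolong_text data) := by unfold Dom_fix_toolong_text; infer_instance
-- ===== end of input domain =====

-- B replaces A's index loop (i%3 test, newline prepended per element) by a short-string early
-- return plus a recursion emitting three fields at a time; objective: simpler.

-- ===== PORT A =====
def fix_toolong_text (data : String) : String :=
  let split_data := PySem.Chars.splitOn data.toList [',']
  let new_str := (PySem.List.pyRange 0 (PySem.List.len split_data) 1).foldl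
    (fun acc i =>
      if i % 3 = 0 ∧ i ≠ 0 ∧ PySem.Str.len data > 38 then
        acc ++ ['\n' :: PySem.List.pyGetD split_data i []]
      else
        acc ++ [PySem.List.pyGetD split_data i []])
    []
  String.ofList (PySem.Chars.join [','] new_str)

-- ===== PORT B =====
-- helper: ",".join(fields[:3]) + ",\n" + group(fields[3:]) until at most three fields remain
def pvGroup (fields : List (List Char)) : List Char :=
  if fields.length ≤ 3 then PySem.Chars.join [','] fields
  else
    PySem.Chars.join [','] (PySem.List.slice fields none (some 3)) ++ [',', '\n'] ++
      pvGroup (PySem.List.slice fields (some 3) none)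
termination_by fields.length
decreasing_by
  rw [PySem.List.slice_from fields (a := 3) (by norm_num)]
  simp only [List.length_drop]
  omega

def fix_toolong_text_alt (data : String) : String :=
  if PySem.Str.len data ≤ 38 then data
  else String.ofList (pvGroup (PySem.Chars.splitOn data.toList [',']))

-- ===== PRECONDITION & SPEC =====
def Spec_fix_toolong_text (data : String) (out : String) : Prop := out = fix_toolong_text_alt data
instance (data : String) (out : String) : Decidable (Spec_fix_toolong_text data out) := by unfold Spec_fix_toolong_text; infer_instance

-- ===== CLAIM (what is proved, stated in full; the proofs are below) =====
def Claim_equal_fix_toolong_text : Prop := ∀ (data : String), Dom_fix_toolong_text data → Spec_fix_toolong_text data (fix_toolong_text data)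

-- ===== LEMMAS AND PROOFS =====

-- PySem.Chars.splitOn with a single-character separator is Mathlib's List.splitOn
theorem pv_go_eq (c : Char) : ∀ (fuel : Nat) (l cur : List Char) (acc : List (List Char)),
    l.length ≤ fuel →
    PySem.Chars.splitOn.go [c] fuel l cur acc
      = acc.reverse ++ (List.splitOnP (· == c) l).modifyHead (cur.reverse ++ ·) := by
  intro fuel
  induction fuel with
  | zero =>
    intro l cur acc hl
    have : l = [] := List.eq_nil_of_length_eq_zero (Nat.le_zero.mp hl)
    subst this
    simp [PySem.Chars.splitOn.go, List.splitOnP_nil]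
  | succ f ih =>
    intro l cur acc hl
    cases l with
    | nil => simp [PySem.Chars.splitOn.go, List.splitOnP_nil]
    | cons h rest =>
      rw [PySem.Chars.splitOn.go]
      by_cases hc : c = h
      · subst hc
        simp only [List.isPrefixOf, beq_self_eq_true, Bool.and_self, if_pos]
        rw [ih _ _ _ (by simpa using Nat.le_of_succ_le_succ hl)]
        simp [List.splitOnP_cons]
        cases (List.splitOnP (· == c) rest) <;> simp
      · rw [if_neg (by simp [List.isPrefixOf, hc])]
        rw [ih _ _ _ (by simpa using Nat.le_of_succ_le_succ hl)]
        simp [List.splitOnP_cons, Ne.symm hc, List.modifyHead_modifyHead]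
        cases (List.splitOnP (· == c) rest) <;> simp

theorem pv_splitOn_eq (c : Char) (cs : List Char) :
    PySem.Chars.splitOn cs [c] = List.splitOn c cs := by
  rw [PySem.Chars.splitOn, pv_go_eq c _ _ _ _ (Nat.le_succ _), List.splitOn]
  cases List.splitOnP (· == c) cs <;> simp

-- the decoration A applies to field number i (long-input case)
def pvDec (i : Nat) (x : List Char) : List Char :=
  if i % 3 = 0 ∧ i ≠ 0 then '\n' :: x else x

theorem pv_mapIdx_congr {α β : Type} : ∀ (l : List α) (f g : Nat → α → β),
    (∀ i x, f i x = g i x) → l.mapIdx f = l.mapIdx g := by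
  intro l
  induction l with
  | nil => simp
  | cons a t ih =>
    intro f g h
    simp only [List.mapIdx_cons, h]
    exact congrArg _ (ih _ _ (fun i x => h (i + 1) x))

theorem pv_range_map_getD {α β : Type} : ∀ (l : List α) (d : α) (G : Nat → α → β),
    (List.range l.length).map (fun k => G k (l.getD k d)) = l.mapIdx G := by
  intro l
  induction l with
  | nil => simp
  | cons a t ih =>
    intro d G
    simp only [List.length_cons, List.range_succ_eq_map, List.map_cons, List.map_map,
      List.mapIdx_cons, List.getD_cons_zero]
    refine congrArg _ ?_
    rw [← ih d (fun i x => G (i + 1) x)]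
    refine List.map_congr_left ?_
    intro k _
    simp [Nat.succ_eq_add_one]

-- A's loop, rewritten as a mapIdx over the split fields
theorem pvA_eq (data : String) :
    fix_toolong_text data
      = String.ofList (PySem.Chars.join [','] ((List.splitOn ',' data.toList).mapIdx
          (fun i x => if (i : Int) % 3 = 0 ∧ (i : Int) ≠ 0 ∧ PySem.Str.len data > 38
                      then '\n' :: x else x))) := by
  unfold fix_toolong_text
  simp only []
  rw [pv_splitOn_eq]
  have hf : (fun (acc : List (List Char)) (i : Int) =>
      if i % 3 = 0 ∧ i ≠ 0 ∧ PySem.Str.len data > 38 then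
        acc ++ ['\n' :: PySem.List.pyGetD (List.splitOn ',' data.toList) i []]
      else
        acc ++ [PySem.List.pyGetD (List.splitOn ',' data.toList) i []])
    = (fun acc i => acc ++ [if i % 3 = 0 ∧ i ≠ 0 ∧ PySem.Str.len data > 38 then
          '\n' :: PySem.List.pyGetD (List.splitOn ',' data.toList) i []
        else PySem.List.pyGetD (List.splitOn ',' data.toList) i []]) := by
    funext acc i
    split_ifs <;> rfl
  rw [hf, PySem.List.foldl_append_singleton_eq_map
        (f := fun i => if i % 3 = 0 ∧ i ≠ 0 ∧ PySem.Str.len data > 38 then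
          '\n' :: PySem.List.pyGetD (List.splitOn ',' data.toList) i []
        else PySem.List.pyGetD (List.splitOn ',' data.toList) i []),
      PySem.List.pyRange_one]
  simp only [List.nil_append, List.map_map]
  rw [show (PySem.List.len (List.splitOn ',' data.toList) - 0).toNat
        = (List.splitOn ',' data.toList).length by simp [PySem.List.len]]
  rw [← pv_range_map_getD (List.splitOn ',' data.toList) []
        (fun k x => if (k : Int) % 3 = 0 ∧ (k : Int) ≠ 0 ∧ PySem.Str.len data > 38
                    then '\n' :: x else x)]
  refine congrArg _ (congrArg _ (List.map_congr_left ?_))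
  intro k _
  simp [PySem.List.pyGetD_natCast]

-- with the length guard false, the mapIdx is the identity and join undoes split
theorem pvA_short (data : String) (h : ¬ PySem.Str.len data > 38) :
    fix_toolong_text data = data := by
  rw [pvA_eq]
  have hid : (List.splitOn ',' data.toList).mapIdx
      (fun i x => if (i : Int) % 3 = 0 ∧ (i : Int) ≠ 0 ∧ PySem.Str.len data > 38
                  then '\n' :: x else x) = List.splitOn ',' data.toList := by
    rw [pv_mapIdx_congr _ _ (fun _ x => x) (by
      intro i x
      rw [if_neg]
      rintro ⟨-, -, hg⟩
      exact h hg)]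
    simp [List.mapIdx_eq_zipIdx_map]
  rw [hid]
  rw [show PySem.Chars.join [','] (List.splitOn ',' data.toList)
        = [','].intercalate (List.splitOn ',' data.toList) from rfl,
      List.intercalate_splitOn, String.ofList_toList]

theorem pv_join_cons_nl (y : List Char) (t : List (List Char)) :
    PySem.Chars.join [','] (('\n' :: y) :: t) = '\n' :: PySem.Chars.join [','] (y :: t) := by
  cases t with
  | nil => simp [PySem.Chars.join_singleton]
  | cons z t' => simp [PySem.Chars.join_cons_cons]

-- shifting the decoration index past one full group prepends a newline to the head
theorem pv_shift3 : ∀ (l : List (List Char)),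
    l.mapIdx (fun i x => pvDec (i + 1 + 1 + 1) x)
      = (l.mapIdx pvDec).modifyHead ('\n' :: ·) := by
  intro l
  cases l with
  | nil => simp
  | cons y t =>
    simp only [List.mapIdx_cons, List.modifyHead_cons]
    refine congrArg₂ _ (by simp [pvDec]) ?_
    refine pv_mapIdx_congr _ _ _ ?_
    intro i x
    have hmod : (i + 1 + 1 + 1 + 1) % 3 = (i + 1) % 3 := by omega
    simp [pvDec, hmod]

-- main lemma (fueled induction): the decorated join equals the grouped join
theorem pv_join_group_aux : ∀ (n : Nat) (parts : List (List Char)), parts.length ≤ n → parts ≠ [] →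
    PySem.Chars.join [','] (parts.mapIdx pvDec) = pvGroup parts := by
  intro n
  induction n with
  | zero =>
    intro parts hl hne
    exact absurd (List.eq_nil_of_length_eq_zero (Nat.le_zero.mp hl)) hne
  | succ n ih =>
  intro parts hl hne
  rw [pvGroup]
  by_cases h3 : parts.length ≤ 3
  · rw [if_pos h3]
    rcases parts with _ | ⟨a, _ | ⟨b, _ | ⟨c, _ | ⟨r, rest⟩⟩⟩⟩
    · simp
    · simp [List.mapIdx_cons, pvDec]
    · simp [List.mapIdx_cons, pvDec]
    · simp [List.mapIdx_cons, pvDec]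
    · exfalso; simp at h3; omega
  · rw [if_neg h3]
    rcases parts with _ | ⟨a, _ | ⟨b, _ | ⟨c, _ | ⟨r, rest⟩⟩⟩⟩
    · simp at h3
    · simp at h3
    · simp at h3
    · simp at h3
    rw [List.mapIdx_cons, List.mapIdx_cons, List.mapIdx_cons, pv_shift3]
    rw [PySem.List.slice_to _ (b := 3) (by norm_num),
        PySem.List.slice_from _ (a := 3) (by norm_num)]
    rw [show pvDec 0 a = a by simp [pvDec],
        show pvDec (0 + 1) b = b by simp [pvDec],
        show pvDec (0 + 1 + 1) c = c by simp [pvDec]]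
    simp only [show Int.toNat 3 = 3 from rfl, List.take_succ_cons, List.take_zero,
      List.drop_succ_cons, List.drop_zero]
    rw [← ih (r :: rest) (by simp at hl ⊢; omega) (by simp)]
    rcases hys : (r :: rest).mapIdx pvDec with _ | ⟨y, t⟩
    · exact absurd (congrArg List.length hys) (by simp)
    · simp [PySem.Chars.join_cons_cons, pv_join_cons_nl, List.append_assoc]

theorem pv_join_group (parts : List (List Char)) (hne : parts ≠ []) :
    PySem.Chars.join [','] (parts.mapIdx pvDec) = pvGroup parts :=
  pv_join_group_aux parts.length parts le_rfl hne

-- ===== VERDICT (by name: the statement is the Claim_ definition above) =====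
theorem fix_toolong_text_spec : Claim_equal_fix_toolong_text := by
  intro data _
  unfold Spec_fix_toolong_text fix_toolong_text_alt
  by_cases h : PySem.Str.len data ≤ 38
  · rw [if_pos h]
    exact pvA_short data (by omega)
  · rw [if_neg h, pvA_eq, pv_splitOn_eq]
    have hg : PySem.Str.len data > 38 := by omega
    rw [pv_mapIdx_congr _ _ pvDec ?_]
    · exact congrArg _ (pv_join_group _ (by rw [List.splitOn]; exact List.splitOnP_ne_nil _ _))
    · intro i x
      have hc1 : ((i : Int) % 3 = 0) ↔ (i % 3 = 0) := by omega
      have hc2 : ((i : Int) ≠ 0) ↔ (i ≠ 0) := by omega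
      simp only [pvDec, hc1, hc2, hg, and_true]
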